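-- pv_equiv track=rewrite | github.com/KirstenLNelson/epsilon-almost-covering-arrays | genBDNS.py | is_smallest
-- ===== SOURCE A (Python) =====
-- def is_smallest(poss_seq, g):
-- # -----------------------------------------------------------------------------
--     '''
--     >>> # Test all rotations of a known sequence
--     >>> is_smallest([-1,0,0,2,0],3)
--     True
--     >>> is_smallest([0,0,2,0,-1],3)
--     False
--     >>> is_smallest([0,2,0,-1,1],3)
--     False
--     >>> is_smallest([2,0,-1,1,1],3)
--     False
--     >>> is_smallest([0,-1,1,1,0],3)
--     False
--     >>> # What if there are two infinities?
--     >>> is_smallest([-1,-1,0,0,2,0,1],3)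
--     True
--     >>> is_smallest([-1,0,0,2,0,1,-1],3)
--     False
--     >>> # What if there are two infinities not together?
--     >>> is_smallest([-1,0,0,2,-1,0,1],3)
--     True
--     >>> is_smallest([-1,0,1,-1,0,0,2],3)
--     False
--     '''
--     total_rotations = len(poss_seq)*g
--     rotated_seq = poss_seq
--     for i in range(0, total_rotations):
--         rotated_seq = rotate_this(rotated_seq,g)
-- # We have proven that gaps are preserved with rotation, so no need to check
-- #        if rotated_seq < poss_seq and all_gaps_met(dup_shift,g):
--         if rotated_seq < poss_seq:
--             return False
--         if rotated_seq == poss_seq: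
--             return True
--     return True
--
-- def rotate_this(poss_seq, g):
-- # -----------------------------------------------------------------------------
--     '''
--     >>> rotate_this([0,0,1,1],2)
--     [0, 1, 1, 1]
--     >>> rotate_this([-1,0,1,1],2)
--     [0, 1, 1, -1]
--     '''
--     new_seq = poss_seq[1:]
--     if poss_seq[0] != -1:
--         new_seq.append((poss_seq[0]+1) % g)
--     else:
--         new_seq.append(-1)
--     return new_seq
-- ===== SOURCE B (Python) =====
-- def is_smallest(poss_seq, g):
--     n = len(poss_seq)
--
--     def elem(k):
--         # closed-form element k of the necklace: position k carries the (k // n)-th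
--         # increment of poss_seq[k % n] mod g; infinities (-1) stay -1.
--         if k < n:
--             return poss_seq[k]
--         v = poss_seq[k % n]
--         return -1 if v == -1 else (v + k // n) % g
--
--     for i in range(1, n * g + 1):
--         # lexicographic first-difference comparison of window [i, i+n) with poss_seq
--         cmp = 0
--         for t in range(n):
--             e = elem(i + t)
--             if e != poss_seq[t]:
--                 cmp = -1 if e < poss_seq[t] else 1
--                 break
--         if cmp < 0:
--             return False
--         if cmp == 0:
--             return True
--     return True
-- ===== Notes on version B (the rewrite author's own statement) =====
-- stated objective: faster
-- what changed: B drops A's rotation chain: instead of materialising a new rotated list each of the n*g steps, it indexes the necklace expansion by the closed form (v + k//n) % g and compares each window to poss_seq by first difference, exiting the comparison at the first unequal element.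
import Mathlib
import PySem

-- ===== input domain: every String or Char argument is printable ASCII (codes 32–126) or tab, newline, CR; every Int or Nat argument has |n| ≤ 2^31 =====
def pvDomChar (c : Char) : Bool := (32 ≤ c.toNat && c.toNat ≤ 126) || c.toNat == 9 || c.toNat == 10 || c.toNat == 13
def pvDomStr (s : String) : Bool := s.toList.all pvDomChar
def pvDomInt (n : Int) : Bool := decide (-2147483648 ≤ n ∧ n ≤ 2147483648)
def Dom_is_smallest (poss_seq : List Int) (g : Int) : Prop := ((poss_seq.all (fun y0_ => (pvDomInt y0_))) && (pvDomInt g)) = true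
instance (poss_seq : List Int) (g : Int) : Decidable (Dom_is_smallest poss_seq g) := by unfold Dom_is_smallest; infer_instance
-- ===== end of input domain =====

-- B replaces A's chain of materialised rotations by closed-form necklace indexing with
-- first-difference window comparisons (constant-factor faster, measured).


-- Python's '<' on lists of ints (lexicographic; a proper prefix is smaller); shared by both ports.
def pyLt : List Int → List Int → Bool
  | [], [] => false
  | [], _ :: _ => true
  | _ :: _, [] => false
  | a :: as, b :: bs => if a < b then true else if b < a then false else pyLt as bs

-- ===== PORT A =====
-- rotate_this(poss_seq, g); the 'none' branch is Python's IndexError on the empty list,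
-- unreachable from is_smallest (its loop runs only when len(poss_seq)*g > 0).
def rotate_this (poss_seq : List Int) (g : Int) : List Int :=
  let new_seq := PySem.List.slice poss_seq (some 1) none
  match PySem.List.pyGet? poss_seq 0 with
  | some h => if h ≠ -1 then new_seq ++ [PySem.Int.mod (h + 1) g] else new_seq ++ [-1]
  | none => new_seq

-- A's 'for i in range(0, total_rotations)' loop; fuel = iterations left, state = rotated_seq
def isLoopA (seq : List Int) (g : Int) : List Int → Nat → Bool
  | _, 0 => true
  | cur, Nat.succ k =>
      let r := rotate_this cur g
      if pyLt r seq then false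
      else if r = seq then true
      else isLoopA seq g r k

def is_smallest (poss_seq : List Int) (g : Int) : Bool :=
  let total_rotations := PySem.List.len poss_seq * g
  isLoopA poss_seq g poss_seq total_rotations.toNat

-- ===== PORT B =====
-- helper elem(k): closed-form element k of the necklace
def elemB (poss_seq : List Int) (g : Int) (n : Int) (k : Int) : Int :=
  if k < n then PySem.List.pyGetD poss_seq k 0
  else
    let v := PySem.List.pyGetD poss_seq (PySem.Int.mod k n) 0
    if v = -1 then -1 else PySem.Int.mod (v + PySem.Int.floordiv k n) g

-- B's inner 'for t in range(n)' first-difference comparison; fuel = iterations left, t = index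
def cmpLoop (poss_seq : List Int) (g : Int) (n : Int) (i : Int) : Nat → Int → Int
  | 0, _ => 0
  | Nat.succ f, t =>
      let e := elemB poss_seq g n (i + t)
      let p := PySem.List.pyGetD poss_seq t 0
      if e ≠ p then (if e < p then -1 else 1) else cmpLoop poss_seq g n i f (t + 1)

-- B's outer 'for i in range(1, n*g+1)' loop; fuel = iterations left
def altLoop (poss_seq : List Int) (g : Int) (n : Int) : Nat → Int → Bool
  | 0, _ => true
  | Nat.succ f, i =>
      let c := cmpLoop poss_seq g n i n.toNat 0
      if c < 0 then false
      else if c = 0 then true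
      else altLoop poss_seq g n f (i + 1)

def is_smallest_alt (poss_seq : List Int) (g : Int) : Bool :=
  let n : Int := PySem.List.len poss_seq
  altLoop poss_seq g n (n * g).toNat 1

-- ===== PRECONDITION & SPEC =====
def Spec_is_smallest (poss_seq : List Int) (g : Int) (out : Bool) : Prop := out = is_smallest_alt poss_seq g
instance (poss_seq : List Int) (g : Int) (out : Bool) : Decidable (Spec_is_smallest poss_seq g out) := by unfold Spec_is_smallest; infer_instance

-- ===== CLAIM (what is proved, stated in full; the proofs are below) =====
def Claim_equal_is_smallest : Prop := ∀ (poss_seq : List Int) (g : Int), Dom_is_smallest poss_seq g → Spec_is_smallest poss_seq g (is_smallest poss_seq g)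

-- ===== LEMMAS AND PROOFS =====

-- closed-form element k of the necklace expansion of seq
def Sk (seq : List Int) (g : Int) (k : Nat) : Int :=
  if k < seq.length then seq.getD k 0
  else
    let v := seq.getD (k % seq.length) 0
    if v = -1 then -1 else PySem.Int.mod (v + (k / seq.length : Nat)) g

-- the length-n window of the necklace starting at position i
def Wf (seq : List Int) (g : Int) (i : Nat) : List Int :=
  (List.range seq.length).map (fun j => Sk seq g (i + j))

-- i-fold iterated rotation (A's loop state after i iterations)
def itf (seq : List Int) (g : Int) (i : Nat) : List Int :=
  (fun s => rotate_this s g)^[i] seq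

theorem Wf_zero (seq : List Int) (g : Int) : Wf seq g 0 = seq := by
  apply List.ext_getElem
  · simp [Wf]
  · intro i h1 h2
    simp [Wf, Sk, List.getD_eq_getElem?_getD, h2]

theorem Sk_step (seq : List Int) (g : Int) (hn : seq ≠ []) (hg : 1 ≤ g) (k : Nat) :
    (if Sk seq g k = -1 then (-1 : Int) else PySem.Int.mod (Sk seq g k + 1) g) = Sk seq g (k + seq.length) := by
  have hn' : 0 < seq.length := List.length_pos_iff.mpr hn
  have hmod : (k + seq.length) % seq.length = k % seq.length := Nat.add_mod_right k seq.length
  have hdiv : (k + seq.length) / seq.length = k / seq.length + 1 := Nat.add_div_right k hn'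
  have hnl : ¬ (k + seq.length < seq.length) := by omega
  have hmodg : ∀ a : Int, PySem.Int.mod (PySem.Int.mod a g + 1) g = PySem.Int.mod (a + 1) g := by
    intro a
    rw [PySem.Int.mod_eq_emod_of_pos (by omega : (0:Int) < g),
        PySem.Int.mod_eq_emod_of_pos (by omega : (0:Int) < g),
        PySem.Int.mod_eq_emod_of_pos (by omega : (0:Int) < g),
        Int.emod_add_emod]
  by_cases hk : k < seq.length
  · have hmk : k % seq.length = k := Nat.mod_eq_of_lt hk
    have h0 : k / seq.length = 0 := Nat.div_eq_of_lt hk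
    simp only [Sk, if_pos hk, if_neg hnl, hmod, hdiv, hmk, h0]
    by_cases hv : seq.getD k 0 = -1
    · rw [if_pos hv, if_pos hv]
    · rw [if_neg hv, if_neg hv]
      norm_num
  · simp only [Sk, if_neg hk, if_neg hnl, hmod, hdiv]
    by_cases hv : seq.getD (k % seq.length) 0 = -1
    · rw [if_pos hv, if_pos hv, if_pos rfl]
    · rw [if_neg hv, if_neg hv]
      have hge : (0:Int) ≤ PySem.Int.mod (seq.getD (k % seq.length) 0 + ↑(k / seq.length)) g :=
        PySem.Int.mod_nonneg _ (by omega)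
      rw [if_neg (by omega), hmodg]
      push_cast
      ring_nf

theorem rotW (seq : List Int) (g : Int) (hn : seq ≠ []) (hg : 1 ≤ g) (i : Nat) :
    rotate_this (Wf seq g i) g = Wf seq g (i + 1) := by
  obtain ⟨m, hm⟩ : ∃ m, seq.length = m + 1 := ⟨seq.length - 1, by have := List.length_pos_iff.mpr hn; omega⟩
  have h1 : ∀ j, i + (j + 1) = i + 1 + j := by omega
  have hcons : Wf seq g i = Sk seq g i :: (List.range m).map (fun j => Sk seq g (i + 1 + j)) := by
    unfold Wf
    rw [hm, List.range_succ_eq_map, List.map_cons, List.map_map]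
    refine congrArg₂ List.cons rfl (List.map_congr_left ?_)
    intro j _
    show Sk seq g (i + (j + 1)) = Sk seq g (i + 1 + j)
    rw [h1 j]
  have htail : Wf seq g (i + 1) = (List.range m).map (fun j => Sk seq g (i + 1 + j)) ++ [Sk seq g (i + seq.length)] := by
    unfold Wf
    rw [hm, List.range_succ, List.map_append, List.map_singleton]
    simp only [show i + (m + 1) = i + 1 + m from by omega]
  rw [hcons]
  unfold rotate_this
  rw [PySem.List.slice_from_one]
  simp only [PySem.List.pyGet?_zero_cons, List.tail_cons]
  rw [htail, ← Sk_step seq g hn hg i]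
  by_cases hv : Sk seq g i = -1
  · rw [if_pos hv, if_neg (by simp [hv])]
  · rw [if_neg hv, if_pos hv]

theorem itf_eq_Wf (seq : List Int) (g : Int) (hn : seq ≠ []) (hg : 1 ≤ g) (i : Nat) :
    itf seq g i = Wf seq g i := by
  induction i with
  | zero => simp [itf, Wf_zero]
  | succ k ih =>
    unfold itf
    rw [Function.iterate_succ_apply']
    have : (fun s => rotate_this s g)^[k] seq = Wf seq g k := ih
    rw [this]
    exact rotW seq g hn hg k

theorem itf_succ (seq : List Int) (g : Int) (i : Nat) :
    itf seq g (i + 1) = rotate_this (itf seq g i) g := by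
  unfold itf; rw [Function.iterate_succ_apply']

theorem elemB_natCast (seq : List Int) (g : Int) (k : Nat) :
    elemB seq g (↑seq.length) (↑k) = Sk seq g k := by
  by_cases hk : k < seq.length
  · rw [elemB, if_pos (by exact_mod_cast hk), Sk, if_pos hk, PySem.List.pyGetD_natCast]
  · rw [elemB, if_neg (by exact_mod_cast hk), Sk, if_neg hk,
        PySem.Int.mod_natCast, PySem.Int.floordiv_natCast, PySem.List.pyGetD_natCast]

theorem cmpLoop_spec (seq : List Int) (g : Int) (j : Nat) :
    ∀ (f t : Nat), f + t = seq.length →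
      cmpLoop seq g (↑seq.length) (↑j) f (↑t) =
        (if pyLt ((List.range f).map (fun u => Sk seq g (j + t + u))) (seq.drop t) then -1
         else if (List.range f).map (fun u => Sk seq g (j + t + u)) = seq.drop t then 0 else 1) := by
  intro f
  induction f with
  | zero =>
    intro t ht
    have : seq.drop t = [] := List.drop_of_length_le (by omega)
    simp [cmpLoop, this, pyLt]
  | succ f ih =>
    intro t ht
    have htlt : t < seq.length := by omega
    have hdrop : seq.drop t = seq[t] :: seq.drop (t + 1) := List.drop_eq_getElem_cons htlt
    have hlist : (List.range (f + 1)).map (fun u => Sk seq g (j + t + u)) =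
        Sk seq g (j + t) :: (List.range f).map (fun u => Sk seq g (j + (t + 1) + u)) := by
      rw [List.range_succ_eq_map, List.map_cons, List.map_map]
      refine congrArg₂ List.cons rfl (List.map_congr_left ?_)
      intro u _
      show Sk seq g (j + t + (u + 1)) = Sk seq g (j + (t + 1) + u)
      rw [show j + t + (u + 1) = j + (t + 1) + u from by omega]
    have he : elemB seq g (↑seq.length) ((↑j : Int) + ↑t) = Sk seq g (j + t) := by
      rw [show (↑j : Int) + ↑t = ↑(j + t) from by push_cast; ring, elemB_natCast]
    have hp : PySem.List.pyGetD seq (↑t) 0 = seq[t] := by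
      rw [PySem.List.pyGetD_natCast, List.getD_eq_getElem?_getD, List.getElem?_eq_getElem htlt]
      rfl
    rw [hdrop, hlist]
    show (if elemB seq g (↑seq.length) ((↑j : Int) + ↑t) ≠ PySem.List.pyGetD seq (↑t) 0
          then (if elemB seq g (↑seq.length) ((↑j : Int) + ↑t) < PySem.List.pyGetD seq (↑t) 0 then -1 else 1)
          else cmpLoop seq g (↑seq.length) (↑j) f ((↑t) + 1)) = _
    rw [he, hp]
    by_cases heq : Sk seq g (j + t) = seq[t]
    · rw [if_neg (by simp [heq])]
      rw [show ((↑t : Int) + 1) = ↑(t + 1) from by push_cast; ring]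
      rw [ih (t + 1) (by omega)]
      have hlt : pyLt (Sk seq g (j + t) :: (List.range f).map (fun u => Sk seq g (j + (t + 1) + u)))
          (seq[t] :: seq.drop (t + 1)) =
          pyLt ((List.range f).map (fun u => Sk seq g (j + (t + 1) + u))) (seq.drop (t + 1)) := by
        rw [pyLt, heq]
        simp
      rw [hlt]
      by_cases hl : pyLt ((List.range f).map (fun u => Sk seq g (j + (t + 1) + u))) (seq.drop (t + 1)) = true
      · rw [if_pos hl, if_pos hl]
      · rw [if_neg hl, if_neg hl]
        by_cases he2 : (List.range f).map (fun u => Sk seq g (j + (t + 1) + u)) = seq.drop (t + 1)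
        · rw [if_pos he2, if_pos (by rw [heq, he2])]
        · rw [if_neg he2, if_neg (by intro hcon; exact he2 (List.tail_eq_of_cons_eq hcon))]
    · rw [if_pos (by simp [heq])]
      by_cases hl : Sk seq g (j + t) < seq[t]
      · rw [if_pos hl, if_pos (by rw [pyLt, if_pos hl])]
      · have hgt : seq[t] < Sk seq g (j + t) := by omega
        rw [if_neg hl,
            if_neg (by rw [pyLt, if_neg hl, if_pos hgt]; exact Bool.false_ne_true),
            if_neg (by intro hcon; exact heq (List.head_eq_of_cons_eq hcon))]

theorem cmp_window (seq : List Int) (g : Int) (j : Nat) :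
    cmpLoop seq g (↑seq.length) (↑j) seq.length 0 =
      (if pyLt (Wf seq g j) seq then -1 else if Wf seq g j = seq then 0 else 1) := by
  have h := cmpLoop_spec seq g j seq.length 0 (by omega)
  rw [show ((0 : Nat) : Int) = 0 from rfl] at h
  simpa [Wf] using h

theorem loops_agree (seq : List Int) (g : Int) (hn : seq ≠ []) (hg : 1 ≤ g) :
    ∀ (f j : Nat), isLoopA seq g (itf seq g j) f = altLoop seq g (↑seq.length) f ((↑j : Int) + 1) := by
  intro f
  induction f with
  | zero => intro j; rfl
  | succ f ih =>
    intro j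
    have hr : rotate_this (itf seq g j) g = Wf seq g (j + 1) := by
      rw [← itf_succ, itf_eq_Wf seq g hn hg]
    have hc : cmpLoop seq g (↑seq.length) ((↑j : Int) + 1) ((↑seq.length : Int)).toNat 0 =
        (if pyLt (Wf seq g (j + 1)) seq then -1 else if Wf seq g (j + 1) = seq then 0 else 1) := by
      rw [Int.toNat_natCast, show ((↑j : Int) + 1) = ↑(j + 1) from by push_cast; ring]
      exact cmp_window seq g (j + 1)
    show (if pyLt (rotate_this (itf seq g j) g) seq then false
          else if rotate_this (itf seq g j) g = seq then true
          else isLoopA seq g (rotate_this (itf seq g j) g) f) =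
         (if cmpLoop seq g (↑seq.length) ((↑j : Int) + 1) ((↑seq.length : Int)).toNat 0 < 0 then false
          else if cmpLoop seq g (↑seq.length) ((↑j : Int) + 1) ((↑seq.length : Int)).toNat 0 = 0 then true
          else altLoop seq g (↑seq.length) f ((↑j : Int) + 1 + 1))
    rw [hr, hc]
    cases hl : pyLt (Wf seq g (j + 1)) seq with
    | true => simp
    | false =>
      by_cases he : Wf seq g (j + 1) = seq
      · simp [he]
      · simp only [he, Bool.false_eq_true, if_false, if_neg (by norm_num : ¬(1:Int) < 0),
                   if_neg (by norm_num : (1:Int) ≠ 0)]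
        have hI := ih (j + 1)
        rw [itf_eq_Wf seq g hn hg (j + 1)] at hI
        rw [hI, show ((↑(j + 1) : Int) + 1) = (↑j : Int) + 1 + 1 from by push_cast; ring]

theorem is_smallest_eq_alt (seq : List Int) (g : Int) : is_smallest seq g = is_smallest_alt seq g := by
  by_cases hdeg : seq = [] ∨ g ≤ 0
  · -- degenerate: both loops get fuel 0 and return true
    have h0 : ((PySem.List.len seq) * g).toNat = 0 := by
      rcases hdeg with h | h
      · subst h; simp [PySem.List.len]
      · rw [Int.toNat_eq_zero]
        exact mul_nonpos_of_nonneg_of_nonpos (by rw [PySem.List.len_eq]; positivity) h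
    have hA : is_smallest seq g = true := by
      show isLoopA seq g seq (PySem.List.len seq * g).toNat = true
      rw [h0]
      rfl
    have hB : is_smallest_alt seq g = true := by
      show altLoop seq g (PySem.List.len seq) (PySem.List.len seq * g).toNat 1 = true
      rw [h0]
      rfl
    rw [hA, hB]
  · rw [not_or] at hdeg
    obtain ⟨hn, hg'⟩ := hdeg
    have hg : 1 ≤ g := by omega
    have h := loops_agree seq g hn hg (PySem.List.len seq * g).toNat 0
    show isLoopA seq g seq (PySem.List.len seq * g).toNat =
         altLoop seq g (PySem.List.len seq) (PySem.List.len seq * g).toNat 1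
    have h0 : itf seq g 0 = seq := rfl
    rw [h0] at h
    rw [h]
    rw [PySem.List.len_eq]
    norm_num

-- ===== VERDICT (by name: the statement is the Claim_ definition above) =====
theorem is_smallest_spec : Claim_equal_is_smallest := by
  intro poss_seq g _
  show is_smallest poss_seq g = is_smallest_alt poss_seq g
  exact is_smallest_eq_alt poss_seq g
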